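-- pv_equiv track=rewrite | github.com/JuanFelipep123/Proyecto_estructuras_lenguajes | main.py | convert_to_tuple_lists
-- ===== SOURCE A (Python) =====
-- def convert_to_tuple_lists(productions_dict, terminals):
--     converted_dict = {}
--
--     # Función para particionar la cadena en no terminales y terminales
--     def partition_string(string, terminals, non_terminals):
--         partitions = []
--         current_partition = ""
--         i = 0
--         while i < len(string):
--             found = False
--             # Buscar las claves primero con las claves con más caracteres
--             for non_terminal in sorted(non_terminals, key=len, reverse=True):
--                 if string[i:].startswith(non_terminal):
--                     partitions.append(current_partition)
--                     current_partition = ""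
--                     partitions.append(non_terminal)
--                     i += len(non_terminal)
--                     found = True
--                     break
--             if not found:
--                 # Particionar en terminales si no se encuentra un no terminal
--                 for terminal in terminals:
--                     if string[i:].startswith(terminal):
--                         partitions.append(current_partition)
--                         current_partition = ""
--                         partitions.append(terminal)
--                         i += len(terminal)
--                         found = True
--                         break
--             if not found:
--                 current_partition += string[i]
--                 i += 1
--         partitions.append(current_partition)
--         return partitions
--
--     # Obtener la lista de no terminales
--     non_terminals = list(productions_dict.keys())
--
--     # Convertir cada producción a tuplas de caracteres particionando la cadena
--     for key, value in productions_dict.items():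
--         converted_value = []
--         for item in value:
--             tuple_item = tuple(partition_string(item, terminals, non_terminals))
--             # Eliminar espacios extra
--             tuple_item = tuple(filter(lambda x: x != '', tuple_item))
--             converted_value.append(tuple_item)
--         converted_dict[key] = converted_value
--     return converted_dict
-- ===== SOURCE B (Python) =====
-- def convert_to_tuple_lists(productions_dict, terminals):
--     non_terminals = list(productions_dict)
--
--     def match_at(s, j):
--         # longest non-terminal prefix at j, by max-by-length (no sorting): two
--         # equal-length prefixes at one position are the same string, so ties cannot occur
--         nt = max((k for k in non_terminals if s.startswith(k, j)), key=len, default=None)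
--         if nt is not None:
--             return nt
--         for t in terminals:
--             if s.startswith(t, j):
--                 return t
--         return None
--
--     def split(s):
--         # two cursors: i = start of the pending plain chunk, j = scan position;
--         # chunks are emitted as slices s[i:j], never built character by character
--         parts, i, j, n = [], 0, 0, len(s)
--         while j < n:
--             tok = match_at(s, j)
--             if tok is None:
--                 j += 1
--             else:
--                 if i < j:
--                     parts.append(s[i:j])
--                 parts.append(tok)
--                 j += len(tok)
--                 i = j
--         if i < n:
--             parts.append(s[i:])
--         return tuple(parts)
--
--     return {key: [split(item) for item in value] for key, value in productions_dict.items()}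
-- ===== Notes on version B (the rewrite author's own statement) =====
-- stated objective: alternative
-- what changed: B replaces A's per-position sort of the non-terminals by a direct max-by-length pick over the matching ones, and replaces A's character-accumulator-plus-empty-filter by a two-cursor scan that emits plain chunks as slices s[i:j], so no empty placeholders ever exist.
-- outside the precondition, e.g. on convert_to_tuple_lists({'S': ['S']}, ['']): A returns {'S': [('S',)]}, B returns {'S': [('S',)]}
import Mathlib
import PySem

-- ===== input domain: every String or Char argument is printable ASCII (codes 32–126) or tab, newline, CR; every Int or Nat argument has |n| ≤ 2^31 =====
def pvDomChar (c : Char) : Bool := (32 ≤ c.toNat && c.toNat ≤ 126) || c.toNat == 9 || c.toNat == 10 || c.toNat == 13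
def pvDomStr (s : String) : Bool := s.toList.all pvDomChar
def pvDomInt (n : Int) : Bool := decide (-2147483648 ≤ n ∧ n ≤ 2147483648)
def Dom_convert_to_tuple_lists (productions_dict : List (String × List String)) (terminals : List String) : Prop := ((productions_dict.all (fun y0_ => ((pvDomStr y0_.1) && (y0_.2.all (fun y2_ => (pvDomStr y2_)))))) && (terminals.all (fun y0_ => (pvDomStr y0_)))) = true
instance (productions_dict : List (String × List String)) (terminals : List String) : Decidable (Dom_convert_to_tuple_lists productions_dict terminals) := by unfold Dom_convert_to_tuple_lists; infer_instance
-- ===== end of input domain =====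

-- B keeps no sort and no empty-filter: it picks the longest non-terminal prefix by one
-- max-by-length pass and emits plain chunks as two-cursor slices instead of accumulating
-- characters and filtering empty placeholders afterwards.


-- ===== PORT A =====
-- 'for tok in L: if string[i:].startswith(tok): … break' — the first prefix match in L
-- (A runs this loop on the freshly sorted non-terminals and on the terminals; B's match_at
-- runs the identical loop on the terminals only)
def pvFirstPrefix : List String → List Char → Option String
  | [], _ => none
  | t :: ts, rest => if PySem.Chars.startswith rest t.toList then some t else pvFirstPrefix ts rest

-- A's while-loop over index i, represented by the remaining characters 'rest'; the sort of the
-- non-terminals is re-done on every iteration, exactly as in A.  The fuel argument only makes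
-- the recursion total: Python's loop makes no progress (diverges) exactly when a matched token
-- is empty, and Pre_ excludes empty tokens, so inside Pre_ fuel = len(string)+1 never runs out.
def pvALoop (terminals non_terminals : List String) : Nat → List Char → List String → List Char → List String
  | 0, _, parts, cur => parts ++ [String.ofList cur]
  | fuel+1, rest, parts, cur =>
    match rest with
    | [] => parts ++ [String.ofList cur]
    | c :: rs =>
      match pvFirstPrefix (PySem.List.sorted non_terminals (fun s => PySem.Str.len s) true) (c :: rs) with
      | some nt => pvALoop terminals non_terminals fuel ((c :: rs).drop nt.toList.length) (parts ++ [String.ofList cur, nt]) []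
      | none =>
        match pvFirstPrefix terminals (c :: rs) with
        | some t => pvALoop terminals non_terminals fuel ((c :: rs).drop t.toList.length) (parts ++ [String.ofList cur, t]) []
        | none => pvALoop terminals non_terminals fuel rs parts (cur ++ [c])

-- partition_string followed by A's tuple(filter(lambda x: x != '', …))
def pvPartitionA (terminals non_terminals : List String) (s : String) : List String :=
  (pvALoop terminals non_terminals (s.toList.length + 1) s.toList [] []).filter (fun x => !(x == ""))

def convert_to_tuple_lists (productions_dict : List (String × List String)) (terminals : List String) : List (String × List (List String)) :=
  let d := PySem.Dict.ofList productions_dict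
  let non_terminals := d.keys
  (d.items.foldl
    (fun acc kv => acc.insert kv.1 (kv.2.map (fun item => pvPartitionA terminals non_terminals item)))
    PySem.Dict.empty).items

-- ===== PORT B =====
-- B's match_at: the longest non-terminal prefix at the position, chosen by max-by-length
-- over the matching non-terminals (Python's max(gen, key=len, default=None)); else the
-- first matching terminal; rest = s[j:]
def pvMatchAt (non_terminals terminals : List String) (rest : List Char) : Option String :=
  match PySem.List.max? (non_terminals.filter (fun k => PySem.Chars.startswith rest k.toList)) (fun x => PySem.Str.len x) with
  | some nt => some nt
  | none => pvFirstPrefix terminals rest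

-- B's split: two cursors i (start of the pending plain chunk) and j (scan position) into s;
-- chunks are the slices s[i:j] / s[i:].  Fuel only makes the while-loop total (see pvALoop).
def pvBSplit (non_terminals terminals : List String) (s : List Char) : Nat → Nat → Nat → List String → List String
  | 0, i, _, parts => if i < s.length then parts ++ [String.ofList (s.drop i)] else parts
  | fuel+1, i, j, parts =>
    if j < s.length then
      match pvMatchAt non_terminals terminals (s.drop j) with
      | none => pvBSplit non_terminals terminals s fuel i (j+1) parts
      | some tok =>
          pvBSplit non_terminals terminals s fuel (j + tok.toList.length) (j + tok.toList.length)
            (parts ++ (if i < j then [String.ofList ((s.drop i).take (j - i))] else []) ++ [tok])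
    else if i < s.length then parts ++ [String.ofList (s.drop i)] else parts

def convert_to_tuple_lists_alt (productions_dict : List (String × List String)) (terminals : List String) : List (String × List (List String)) :=
  let d := PySem.Dict.ofList productions_dict
  let non_terminals := d.keys
  d.items.map (fun kv => (kv.1, kv.2.map (fun item => pvBSplit non_terminals terminals item.toList (item.toList.length + 1) 0 0 [])))

-- ===== PRECONDITION & SPEC =====
-- Pre_ excludes inputs carrying an empty-string production key or terminal together with a
-- non-empty production string: there a zero-length match can make A's (and B's) scan loop
-- forever; where the empty token is never reached A still returns, and B returns the same
-- value (see the cite in claim.json).  Inputs whose production strings are all empty never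
-- enter the scan loop and are kept inside Pre_.
def Pre_convert_to_tuple_lists (productions_dict : List (String × List String)) (terminals : List String) : Prop :=
  ("" ∉ productions_dict.map Prod.fst ∧ "" ∉ terminals)
    ∨ (∀ kv ∈ productions_dict, ∀ item ∈ kv.2, item = "")
instance (productions_dict : List (String × List String)) (terminals : List String) : Decidable (Pre_convert_to_tuple_lists productions_dict terminals) := by unfold Pre_convert_to_tuple_lists; infer_instance

def pvWitness_convert_to_tuple_lists : (List (String × List String)) × List String :=
  ([("S", ["aSb", "ab"])], ["a", "b"])

def Spec_convert_to_tuple_lists (productions_dict : List (String × List String)) (terminals : List String) (out : List (String × List (List String))) : Prop := out = convert_to_tuple_lists_alt productions_dict terminals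
instance (productions_dict : List (String × List String)) (terminals : List String) (out : List (String × List (List String))) : Decidable (Spec_convert_to_tuple_lists productions_dict terminals out) := by unfold Spec_convert_to_tuple_lists; infer_instance

-- ===== CLAIM (what is proved, stated in full; the proofs are below) =====
def Claim_equal_convert_to_tuple_lists : Prop := ∀ (productions_dict : List (String × List String)) (terminals : List String), Dom_convert_to_tuple_lists productions_dict terminals → Pre_convert_to_tuple_lists productions_dict terminals → Spec_convert_to_tuple_lists productions_dict terminals (convert_to_tuple_lists productions_dict terminals)

-- ===== LEMMAS AND PROOFS =====

theorem pvFirstPrefix_mem {L : List String} {rest : List Char} {t : String}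
    (h : pvFirstPrefix L rest = some t) : t ∈ L := by
  induction L with
  | nil => simp [pvFirstPrefix] at h
  | cons x xs ih =>
    simp only [pvFirstPrefix] at h
    split at h
    · simp_all
    · exact List.mem_cons_of_mem _ (ih h)

theorem pvFirstPrefix_prefix {L : List String} {rest : List Char} {t : String}
    (h : pvFirstPrefix L rest = some t) : PySem.Chars.startswith rest t.toList = true := by
  induction L with
  | nil => simp [pvFirstPrefix] at h
  | cons x xs ih =>
    simp only [pvFirstPrefix] at h
    split at h
    · cases h; assumption
    · exact ih h

theorem pvFirstPrefix_none_iff {L : List String} {rest : List Char} :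
    pvFirstPrefix L rest = none ↔ ∀ t ∈ L, PySem.Chars.startswith rest t.toList = false := by
  induction L with
  | nil => simp [pvFirstPrefix]
  | cons x xs ih =>
    simp only [pvFirstPrefix]
    split <;> simp_all

-- the first match in a length-descending list is a longest match
theorem pvFirstPrefix_isMax {L : List String} {rest : List Char} {a : String}
    (hp : L.Pairwise (fun x y => PySem.Str.len y ≤ PySem.Str.len x))
    (h : pvFirstPrefix L rest = some a) :
    ∀ t ∈ L, PySem.Chars.startswith rest t.toList = true → PySem.Str.len t ≤ PySem.Str.len a := by
  induction L with
  | nil => simp [pvFirstPrefix] at h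
  | cons x xs ih =>
    simp only [pvFirstPrefix] at h
    rcases List.pairwise_cons.mp hp with ⟨hx, hxs⟩
    split at h
    · cases h
      intro t ht _
      rcases List.mem_cons.mp ht with rfl | ht
      · exact le_refl _
      · exact hx t ht
    · intro t ht hts
      rcases List.mem_cons.mp ht with rfl | ht
      · simp_all
      · exact ih hxs h t ht hts

-- two prefixes of one string with the same length are equal
theorem pv_prefix_eq {rest : List Char} {a b : String}
    (ha : PySem.Chars.startswith rest a.toList = true)
    (hb : PySem.Chars.startswith rest b.toList = true)
    (hl : PySem.Str.len a = PySem.Str.len b) : a = b := by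
  have ha' := (PySem.Chars.startswith_iff _ _).mp ha
  have hb' := (PySem.Chars.startswith_iff _ _).mp hb
  have hl' : a.toList.length = b.toList.length := by
    simpa [PySem.Str.len_eq] using hl
  refine String.toList_inj.mp ?_
  rw [List.prefix_iff_eq_take.mp ha', List.prefix_iff_eq_take.mp hb', hl']

-- B's max-by-length pick equals A's first match in the freshly sorted list
theorem pvMatchAt_eq (non_terminals terminals : List String) (rest : List Char) :
    pvMatchAt non_terminals terminals rest =
      match pvFirstPrefix (PySem.List.sorted non_terminals (fun s => PySem.Str.len s) true) rest with
      | some nt => some nt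
      | none => pvFirstPrefix terminals rest := by
  unfold pvMatchAt
  cases hA : pvFirstPrefix (PySem.List.sorted non_terminals (fun s => PySem.Str.len s) true) rest with
  | none =>
    have hnone : ∀ t ∈ non_terminals, PySem.Chars.startswith rest t.toList = false := by
      intro t ht
      exact pvFirstPrefix_none_iff.mp hA t ((PySem.List.mem_sorted _ _ _ _).mpr ht)
    have hfil : non_terminals.filter (fun k => PySem.Chars.startswith rest k.toList) = [] := by
      refine List.filter_eq_nil_iff.mpr ?_
      intro t ht
      simp [hnone t ht]
    simp [hfil, PySem.List.max?]
  | some a =>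
    have hamem : a ∈ non_terminals :=
      (PySem.List.mem_sorted _ _ _ _).mp (pvFirstPrefix_mem hA)
    have hapre := pvFirstPrefix_prefix hA
    have hamax := pvFirstPrefix_isMax (PySem.List.sorted_pairwise_rev _ _) hA
    have hfilter : a ∈ non_terminals.filter (fun k => PySem.Chars.startswith rest k.toList) :=
      List.mem_filter.mpr ⟨hamem, hapre⟩
    cases hM : PySem.List.max? (non_terminals.filter (fun k => PySem.Chars.startswith rest k.toList)) (fun x => PySem.Str.len x) with
    | none =>
      rw [PySem.List.max?_eq_none_iff] at hM
      simp [hM] at hfilter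
    | some m =>
      rcases List.mem_filter.mp (PySem.List.max?_mem hM) with ⟨hm1, hm2⟩
      have h1 : PySem.Str.len m ≤ PySem.Str.len a :=
        hamax m ((PySem.List.mem_sorted _ _ _ _).mpr hm1) hm2
      have h2 : PySem.Str.len a ≤ PySem.Str.len m :=
        PySem.List.max?_isMax hM a hfilter
      simp [pv_prefix_eq hm2 hapre (le_antisymm h1 h2)]

theorem pv_mk_ne_empty {cur : List Char} (h : cur ≠ []) :
    (String.ofList cur == "") = false := by
  cases cur with
  | nil => simp at h
  | cons c cs => simp

theorem pv_ne_empty_beq {t : String} (h : t ≠ "") : (t == "") = false := by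
  simpa using h

theorem pv_toList_ne_nil {t : String} (h : t ≠ "") : t.toList ≠ [] := by
  intro hl
  exact h (String.toList_eq_nil_iff.mp hl)

theorem pv_take_ne_nil {s : List Char} {i j : Nat} (hij : i < j) (hjs : j ≤ s.length) :
    (s.drop i).take (j - i) ≠ [] := by
  have hlen : ((s.drop i).take (j - i)).length = j - i := by
    rw [List.length_take, List.length_drop]; omega
  intro h
  rw [h] at hlen
  simp at hlen
  omega

theorem pv_take_succ_char {s : List Char} {i j : Nat} (hij : i ≤ j) (hjs : j < s.length) :
    (s.drop i).take (j + 1 - i) = (s.drop i).take (j - i) ++ [s[j]] := by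
  have h1 : j + 1 - i = (j - i) + 1 := by omega
  have h2 : j - i < (s.drop i).length := by rw [List.length_drop]; omega
  have hj2 : i + (j - i) = j := by omega
  rw [h1, List.take_add_one, List.getElem?_eq_getElem h2]
  simp only [List.getElem_drop, hj2, Option.toList_some]

-- the lockstep invariant: A's state (rest, cur) is B's cursor pair (i, j) into s,
-- rest = s[j:], cur = s[i:j]; B's parts are A's parts with the empties dropped
theorem pvLoop_eq (terminals non_terminals : List String)
    (hne : (∀ t ∈ non_terminals, t ≠ "") ∧ (∀ t ∈ terminals, t ≠ "")) (s : List Char) :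
    ∀ (fuel i j : Nat) (partsA partsB : List String),
      partsA.filter (fun x => !(x == "")) = partsB → i ≤ j → j ≤ s.length → s.length - j < fuel →
      (pvALoop terminals non_terminals fuel (s.drop j) partsA ((s.drop i).take (j - i))).filter (fun x => !(x == ""))
        = pvBSplit non_terminals terminals s fuel i j partsB := by
  intro fuel
  induction fuel with
  | zero => intro i j pa pb _ _ _ hf; omega
  | succ fuel ih =>
    intro i j pa pb hp hij hjs hf
    by_cases hjlt : j < s.length
    · have hdrop : s.drop j = s[j] :: s.drop (j+1) := List.drop_eq_getElem_cons hjlt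
      cases hnt : pvFirstPrefix (PySem.List.sorted non_terminals (fun s => PySem.Str.len s) true) (s.drop j) with
      | some tok =>
        have hmem : tok ∈ non_terminals :=
          (PySem.List.mem_sorted _ _ _ _).mp (pvFirstPrefix_mem hnt)
        have htokne : tok ≠ "" := hne.1 tok hmem
        have htoklen : 1 ≤ tok.toList.length :=
          List.length_pos_iff.mpr (pv_toList_ne_nil htokne)
        have hpre' : tok.toList <+: s.drop j :=
          (PySem.Chars.startswith_iff _ _).mp (pvFirstPrefix_prefix hnt)
        have hlen : tok.toList.length ≤ s.length - j := by
          have := hpre'.length_le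
          rw [List.length_drop] at this
          omega
        -- B side reduces through pvMatchAt_eq, then A side through hdrop
        simp only [pvBSplit, if_pos hjlt, pvMatchAt_eq, hnt]
        rw [hdrop] at hnt ⊢
        simp only [pvALoop, hnt]
        rw [← hdrop, List.drop_drop]
        have hparts : (pa ++ [String.ofList ((s.drop i).take (j - i)), tok]).filter (fun x => !(x == ""))
            = pb ++ (if i < j then [String.ofList ((s.drop i).take (j - i))] else []) ++ [tok] := by
          rw [List.filter_append, hp]
          by_cases hij2 : i < j
          · simp [List.filter, pv_mk_ne_empty (pv_take_ne_nil hij2 hjs), pv_ne_empty_beq htokne, hij2]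
          · have : j = i := by omega
            subst this
            simp [List.filter, pv_ne_empty_beq htokne]
        have := ih (j + tok.toList.length) (j + tok.toList.length) _ _ hparts (le_refl _) (by omega) (by omega)
        simpa using this
      | none =>
        cases htm : pvFirstPrefix terminals (s.drop j) with
        | some tok =>
          have hmem : tok ∈ terminals := pvFirstPrefix_mem htm
          have htokne : tok ≠ "" := hne.2 tok hmem
          have htoklen : 1 ≤ tok.toList.length :=
            List.length_pos_iff.mpr (pv_toList_ne_nil htokne)
          have hpre' : tok.toList <+: s.drop j :=
            (PySem.Chars.startswith_iff _ _).mp (pvFirstPrefix_prefix htm)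
          have hlen : tok.toList.length ≤ s.length - j := by
            have := hpre'.length_le
            rw [List.length_drop] at this
            omega
          simp only [pvBSplit, if_pos hjlt, pvMatchAt_eq, hnt, htm]
          rw [hdrop] at hnt htm ⊢
          simp only [pvALoop, hnt, htm]
          rw [← hdrop, List.drop_drop]
          have hparts : (pa ++ [String.ofList ((s.drop i).take (j - i)), tok]).filter (fun x => !(x == ""))
              = pb ++ (if i < j then [String.ofList ((s.drop i).take (j - i))] else []) ++ [tok] := by
            rw [List.filter_append, hp]
            by_cases hij2 : i < j
            · simp [List.filter, pv_mk_ne_empty (pv_take_ne_nil hij2 hjs), pv_ne_empty_beq htokne, hij2]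
            · have : j = i := by omega
              subst this
              simp [List.filter, pv_ne_empty_beq htokne]
          have := ih (j + tok.toList.length) (j + tok.toList.length) _ _ hparts (le_refl _) (by omega) (by omega)
          simpa using this
        | none =>
          simp only [pvBSplit, if_pos hjlt, pvMatchAt_eq, hnt, htm]
          rw [hdrop] at hnt htm ⊢
          simp only [pvALoop, hnt, htm]
          have hcur : ((s.drop i).take (j - i)) ++ [s[j]] = (s.drop i).take (j + 1 - i) :=
            (pv_take_succ_char hij hjlt).symm
          rw [hcur]
          exact ih i (j+1) pa pb hp (by omega) (by omega) (by omega)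
    · -- loop exit: j = len(s); A flushes cur = s[i:], B appends s[i:] iff i < len(s)
      have hj : j = s.length := by omega
      subst hj
      rw [List.drop_length]
      have hcur : (s.drop i).take (s.length - i) = s.drop i := by
        apply List.take_of_length_le
        rw [List.length_drop]
      simp only [pvALoop, pvBSplit, if_neg (lt_irrefl _), hcur, List.filter_append, hp]
      by_cases hi : i < s.length
      · have hne' : s.drop i ≠ [] := by
          intro h
          have := congrArg List.length h
          rw [List.length_drop] at this
          simp at this
          omega
        simp [List.filter, pv_mk_ne_empty hne', hi]
      · have hnil : s.drop i = [] := List.drop_eq_nil_of_le (by omega)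
        simp [hnil, List.filter, if_neg hi]

theorem pv_items_foldl_sub (l : List (String × List String)) :
    ∀ (d : PySem.Dict String (List String)) (p : String × List String),
      p ∈ (l.foldl (fun d kv => d.insert kv.1 kv.2) d).items → p ∈ d.items ∨ p ∈ l := by
  induction l with
  | nil => intro d p h; exact Or.inl h
  | cons kv t ih =>
    intro d p h
    rcases ih (d.insert kv.1 kv.2) p h with h' | h'
    · rcases (PySem.Dict.mem_items_insert _ _ _ _).mp h' with h'' | h''
      · exact Or.inr (h'' ▸ List.mem_cons_self)
      · exact Or.inl h''.1
    · exact Or.inr (List.mem_cons_of_mem _ h')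

theorem pv_mem_keys_ofList {l : List (String × List String)} {s : String}
    (h : s ∈ (PySem.Dict.ofList l).keys) : s ∈ l.map Prod.fst := by
  simp only [PySem.Dict.ofList, PySem.Dict.update] at h
  rw [PySem.Dict.keys_foldl_insert_key] at h
  simpa using h

-- ===== VERDICT (by name: the statement is the Claim_ definition above) =====
theorem convert_to_tuple_lists_spec : Claim_equal_convert_to_tuple_lists := by
  intro pd terminals _hdom hpre
  unfold Spec_convert_to_tuple_lists convert_to_tuple_lists convert_to_tuple_lists_alt
  have hnodup : ((PySem.Dict.ofList pd).items.map Prod.fst).Nodup :=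
    PySem.Dict.nodup_keys_ofList pd
  rw [PySem.Dict.items_foldl_insert_fresh (PySem.Dict.ofList pd).items (fun kv => kv.1)
      (fun kv => kv.2.map (fun item => pvPartitionA terminals (PySem.Dict.ofList pd).keys item))
      PySem.Dict.empty (fun a _ => PySem.Dict.contains_empty _) hnodup]
  rw [show (PySem.Dict.empty : PySem.Dict String (List (List String))).items = [] from rfl, List.nil_append]
  rcases hpre with hpre | hall
  · -- no empty token anywhere: the two scans agree on every string
    have hne : (∀ t ∈ (PySem.Dict.ofList pd).keys, t ≠ "") ∧ (∀ t ∈ terminals, t ≠ "") := by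
      constructor
      · intro t ht rfl
        exact hpre.1 (pv_mem_keys_ofList ht)
      · intro t ht rfl
        exact hpre.2 ht
    have hitem : ∀ item : String,
        pvPartitionA terminals (PySem.Dict.ofList pd).keys item
          = pvBSplit (PySem.Dict.ofList pd).keys terminals item.toList (item.toList.length + 1) 0 0 [] := by
      intro item
      unfold pvPartitionA
      simpa using pvLoop_eq terminals (PySem.Dict.ofList pd).keys hne item.toList
        (item.toList.length + 1) 0 0 [] [] rfl (le_refl 0) (by omega) (by omega)
    simp only [hitem]
  · -- every production string is empty: neither scan ever enters its loop
    refine List.map_congr_left ?_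
    intro kv hkv
    have hkv' : kv ∈ pd := by
      rcases pv_items_foldl_sub pd PySem.Dict.empty kv hkv with h | h
      · simp [PySem.Dict.empty] at h
      · exact h
    refine Prod.ext rfl ?_
    refine List.map_congr_left ?_
    intro item hitem
    have : item = "" := hall kv hkv' item hitem
    subst this
    rfl
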